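-- pv_equiv track=rewrite | github.com/IT21128622/shot-selection | app.py | get_nearest_stumps
-- ===== SOURCE A (Python) =====
-- def get_nearest_stumps(stump_coordinates_range, frame_highest):
--     """Get the nearest stump coordinates within ±5 frames of frame_highest."""
--     nearest_frame = None
--     nearest_stumps = None
--
--     # Sort the frames to find the closest one
--     sorted_frames = sorted(stump_coordinates_range.keys())
--     for frame in sorted_frames:
--         if abs(frame - frame_highest) <= 5:
--             nearest_frame = frame
--             nearest_stumps = stump_coordinates_range[frame]
--             break  # Get the nearest frame
--
--     return nearest_stumps
-- ===== SOURCE B (Python) =====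
-- def get_nearest_stumps(stump_coordinates_range, frame_highest):
--     """Get the nearest stump coordinates within +/-5 frames of frame_highest.
--
--     Single pass over the dict: keep the entry whose frame is the smallest
--     frame within the window (no sort)."""
--     best = None  # (frame, stumps) with the smallest qualifying frame seen
--     for frame, stumps in stump_coordinates_range.items():
--         if abs(frame - frame_highest) <= 5:
--             if best is None or frame < best[0]:
--                 best = (frame, stumps)
--     return best[1] if best is not None else None
-- ===== Notes on version B (the rewrite author's own statement) =====
-- stated objective: faster
-- what changed: Replaced sort-all-keys-then-scan-for-first-qualifying-frame (plus a dict lookup) by a single pass over the items tracking the minimum frame inside the +/-5 window.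
import Mathlib
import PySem

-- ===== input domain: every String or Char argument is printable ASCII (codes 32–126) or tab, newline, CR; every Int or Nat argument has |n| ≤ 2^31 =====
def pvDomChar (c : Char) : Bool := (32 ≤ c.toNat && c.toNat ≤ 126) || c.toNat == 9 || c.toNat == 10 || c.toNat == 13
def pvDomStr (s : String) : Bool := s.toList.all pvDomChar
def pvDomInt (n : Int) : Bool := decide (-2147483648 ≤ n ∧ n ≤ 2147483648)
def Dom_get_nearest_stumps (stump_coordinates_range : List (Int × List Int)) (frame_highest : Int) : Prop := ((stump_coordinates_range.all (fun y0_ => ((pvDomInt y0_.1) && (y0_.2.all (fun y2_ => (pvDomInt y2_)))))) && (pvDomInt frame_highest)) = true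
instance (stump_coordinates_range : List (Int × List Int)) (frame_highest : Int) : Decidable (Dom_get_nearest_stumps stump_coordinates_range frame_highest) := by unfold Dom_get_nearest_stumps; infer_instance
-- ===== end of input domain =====

-- B replaces A's sort-all-keys-then-scan by a single pass tracking the minimum frame within the ±5 window (O(n log n) → O(n)).
-- ===== PORT A =====
-- dict subscript 'stump_coordinates_range[frame]' on the association list: first match (always hits, frame is a key).
def pyDictGet (scr : List (Int × List Int)) (k : Int) : Option (List Int) :=
  (scr.find? (fun p => p.1 == k)).map Prod.snd

-- the 'for frame in sorted_frames: … break' loop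
def aLoop (scr : List (Int × List Int)) (frame_highest : Int) : List Int → Option (List Int)
  | [] => none
  | frame :: rest =>
    if (frame - frame_highest).natAbs ≤ 5 then pyDictGet scr frame
    else aLoop scr frame_highest rest

def get_nearest_stumps (stump_coordinates_range : List (Int × List Int)) (frame_highest : Int) : Option (List Int) :=
  aLoop stump_coordinates_range frame_highest
    (PySem.List.sorted (stump_coordinates_range.map Prod.fst) (fun k => k) false)

-- ===== PORT B =====
-- one iteration of B's loop body
def bStep (frame_highest : Int) (best : Option (Int × List Int)) (p : Int × List Int) :
    Option (Int × List Int) :=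
  if (p.1 - frame_highest).natAbs ≤ 5 then
    match best with
    | none => some p
    | some b => if p.1 < b.1 then some p else best
  else best

def get_nearest_stumps_alt (stump_coordinates_range : List (Int × List Int)) (frame_highest : Int) : Option (List Int) :=
  (stump_coordinates_range.foldl (bStep frame_highest) none).map Prod.snd

-- ===== PRECONDITION & SPEC =====
def Spec_get_nearest_stumps (stump_coordinates_range : List (Int × List Int)) (frame_highest : Int) (out : Option (List Int)) : Prop := out = get_nearest_stumps_alt stump_coordinates_range frame_highest
instance (stump_coordinates_range : List (Int × List Int)) (frame_highest : Int) (out : Option (List Int)) : Decidable (Spec_get_nearest_stumps stump_coordinates_range frame_highest out) := by unfold Spec_get_nearest_stumps; infer_instance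

-- ===== CLAIM (what is proved, stated in full; the proofs are below) =====
def Claim_equal_get_nearest_stumps : Prop := ∀ (stump_coordinates_range : List (Int × List Int)) (frame_highest : Int), Dom_get_nearest_stumps stump_coordinates_range frame_highest → Spec_get_nearest_stumps stump_coordinates_range frame_highest (get_nearest_stumps stump_coordinates_range frame_highest)

-- ===== LEMMAS AND PROOFS =====

-- the window test, as a Bool predicate on a frame
def qWin (fh k : Int) : Bool := decide ((k - fh).natAbs ≤ 5)

-- the else-branch of bStep: running "first minimum-key pair"
def bMin (best : Option (Int × List Int)) (p : Int × List Int) : Option (Int × List Int) :=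
  match best with
  | none => some p
  | some b => if p.1 < b.1 then some p else best

lemma aLoop_eq_find (scr : List (Int × List Int)) (fh : Int) (l : List Int) :
    aLoop scr fh l = (l.find? (qWin fh)).bind (pyDictGet scr) := by
  induction l with
  | nil => rfl
  | cons k t ih =>
    by_cases h : (k - fh).natAbs ≤ 5 <;>
      simp [aLoop, List.find?, qWin, h, ih]

lemma bStep_eq (fh : Int) (best : Option (Int × List Int)) (p : Int × List Int) :
    bStep fh best p = if (p.1 - fh).natAbs ≤ 5 then bMin best p else best := rfl

lemma foldl_bStep_filter (scr : List (Int × List Int)) (fh : Int)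
    (init : Option (Int × List Int)) :
    scr.foldl (bStep fh) init = (scr.filter (fun p => qWin fh p.1)).foldl bMin init := by
  have h : scr.foldl (bStep fh) init
      = scr.foldl (fun acc p => if (p.1 - fh).natAbs ≤ 5 then bMin acc p else acc) init := by
    have : bStep fh = fun acc (p : Int × List Int) =>
        if (p.1 - fh).natAbs ≤ 5 then bMin acc p else acc := by
      funext acc p; exact bStep_eq fh acc p
    rw [this]
  rw [h, PySem.List.foldl_ite_eq_foldl_filter]
  rfl

lemma foldl_bMin_some (t : List (Int × List Int)) (a : Int × List Int) :
    t.foldl bMin (some a) = some (t.foldl (fun b p => if p.1 < b.1 then p else b) a) := by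
  induction t generalizing a with
  | nil => rfl
  | cons p t ih => by_cases h : p.1 < a.1 <;> simp [List.foldl, bMin, h, ih]

lemma keyfold_le (t : List (Int × List Int)) (x : Int) :
    t.foldl (fun x p => min x p.1) x ≤ x ∧ ∀ p ∈ t, t.foldl (fun x p => min x p.1) x ≤ p.1 := by
  have h := PySem.List.foldl_min_le (t.map Prod.fst) x
  rw [List.foldl_map] at h
  exact ⟨h.1, fun p hp => h.2 p.1 (List.mem_map_of_mem hp)⟩

lemma keyfold_mem (t : List (Int × List Int)) (x : Int) :
    t.foldl (fun x p => min x p.1) x = x ∨ ∃ p ∈ t, t.foldl (fun x p => min x p.1) x = p.1 := by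
  have h := PySem.List.foldl_min_mem (t.map Prod.fst) x
  rw [List.foldl_map] at h
  rcases h with h | h
  · exact Or.inl h
  · rcases List.mem_map.mp h with ⟨p, hp, hpe⟩
    exact Or.inr ⟨p, hp, hpe.symm⟩

-- first pair with minimal key: the running-min fold IS find? of the minimal key
lemma find?_min_key (t : List (Int × List Int)) (a : Int × List Int) :
    (a :: t).find? (fun p => p.1 == t.foldl (fun x p => min x p.1) a.1)
      = some (t.foldl (fun b p => if p.1 < b.1 then p else b) a) := by
  induction t generalizing a with
  | nil => simp [List.find?]
  | cons p t ih =>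
    by_cases hp : p.1 < a.1
    · have hmin : min a.1 p.1 = p.1 := min_eq_right hp.le
      have hane : (a.1 == t.foldl (fun x p => min x p.1) p.1) = false := by
        have := (keyfold_le t p.1).1
        simp only [beq_eq_false_iff_ne]; omega
      calc (a :: p :: t).find? (fun q => q.1 == (p :: t).foldl (fun x q => min x q.1) a.1)
          = (p :: t).find? (fun q => q.1 == t.foldl (fun x q => min x q.1) p.1) := by
            simp only [List.foldl_cons, hmin, List.find?_cons, hane]
        _ = some ((p :: t).foldl (fun b q => if q.1 < b.1 then q else b) a) := by
            rw [ih p]; simp [hp]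
    · have hmin : min a.1 p.1 = a.1 := min_eq_left (not_lt.mp hp)
      have hfold : (p :: t).foldl (fun x q => min x q.1) a.1
          = t.foldl (fun x q => min x q.1) a.1 := by simp [hmin]
      set m := t.foldl (fun x q => min x q.1) a.1 with hm
      have hIH := ih a
      rw [← hm] at hIH
      by_cases ha : a.1 = m
      · have htrue : (a.1 == m) = true := by simp [ha]
        simp only [List.find?_cons, htrue] at hIH
        rw [show (p :: t).foldl (fun x q => min x q.1) a.1 = m from hfold]
        simp only [List.find?_cons, htrue]
        simpa [show ¬ p.1 < a.1 from hp] using hIH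
      · have hple : m ≤ a.1 := hm ▸ (keyfold_le t a.1).1
        have hpne : (p.1 == m) = false := by
          simp only [beq_eq_false_iff_ne]
          intro hpe
          have : a.1 ≤ p.1 := not_lt.mp hp
          omega
        have hane : (a.1 == m) = false := by simp [ha]
        simp only [List.find?_cons, hane] at hIH
        rw [show (p :: t).foldl (fun x q => min x q.1) a.1 = m from hfold]
        simp only [List.find?_cons, hane, hpne]
        rw [hIH]
        simp [show ¬ p.1 < a.1 from hp]

-- find? for a key that passes the window test sees through the window filter
lemma find?_filter_key (scr : List (Int × List Int)) (fh k : Int) (hk : qWin fh k = true) :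
    scr.find? (fun p => p.1 == k)
      = (scr.filter (fun p => qWin fh p.1)).find? (fun p => p.1 == k) := by
  induction scr with
  | nil => rfl
  | cons p t ih =>
    by_cases h : p.1 = k
    · subst h; simp [List.find?, List.filter, hk]
    · have hne : (p.1 == k) = false := by simp [h]
      by_cases hq : qWin fh p.1 = true <;>
        simp [List.find?, List.filter, hq, hne, ih]

-- ===== VERDICT (by name: the statement is the Claim_ definition above) =====
theorem get_nearest_stumps_spec : Claim_equal_get_nearest_stumps := by
  intro scr fh _
  unfold Spec_get_nearest_stumps get_nearest_stumps get_nearest_stumps_alt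
  rw [aLoop_eq_find, foldl_bStep_filter]
  set keys := scr.map Prod.fst with hkeys
  set s := PySem.List.sorted keys (fun k => k) false with hs
  set qp := scr.filter (fun p => qWin fh p.1) with hqp
  rcases hfind : s.find? (qWin fh) with _ | k₀
  · -- nothing in the window: both sides are none
    have hnone : ∀ p ∈ scr, qWin fh p.1 = false := by
      intro p hp
      have : p.1 ∈ s := by
        rw [hs, PySem.List.mem_sorted]
        exact List.mem_map_of_mem hp
      have := List.find?_eq_none.mp hfind _ this
      simpa using this
    have : qp = [] := List.filter_eq_nil_iff.mpr (by intro p hp; simp [hnone p hp])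
    simp [this]
  · -- k₀ = first frame of the sorted list in the window
    have hq₀ : qWin fh k₀ = true := List.find?_some hfind
    have hmem₀ : k₀ ∈ s := List.mem_of_find?_eq_some hfind
    -- k₀ is ≤ every key in the window
    have hmin₀ : ∀ y ∈ s, qWin fh y = true → k₀ ≤ y := by
      rcases List.find?_eq_some_iff_append.mp hfind with ⟨_, as, bs, hsplit, hfail⟩
      have hpw : s.Pairwise (fun a b => (fun k => k) a ≤ (fun k => k) b) :=
        PySem.List.sorted_pairwise keys (fun k => k)
      intro y hy hqy
      rw [hsplit] at hy hpw
      rcases List.mem_append.mp hy with hy | hy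
      · exact absurd hqy (by simpa using hfail y hy)
      · rcases List.mem_cons.mp hy with rfl | hy
        · exact le_refl _
        · exact (List.pairwise_cons.mp (List.pairwise_append.mp hpw).2.1).1 y hy
    -- qp is nonempty
    obtain ⟨pk, hpk, hpk1⟩ : ∃ p ∈ scr, p.1 = k₀ := by
      have : k₀ ∈ keys := by rw [hs, PySem.List.mem_sorted] at hmem₀; exact hmem₀
      simpa [hkeys] using this
    have hpkqp : pk ∈ qp := List.mem_filter.mpr ⟨hpk, by simp [hpk1, hq₀]⟩
    rcases hqpe : qp with _ | ⟨a, t⟩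
    · rw [hqpe] at hpkqp; simp at hpkqp
    · set m := t.foldl (fun x p => min x p.1) a.1 with hm
      -- every pair of qp qualifies and its key is in the sorted list
      have hqpmem : ∀ p ∈ qp, qWin fh p.1 = true ∧ p.1 ∈ s := by
        intro p hp
        have h1 := List.mem_filter.mp (hqp ▸ hp)
        refine ⟨h1.2, ?_⟩
        rw [hs, PySem.List.mem_sorted]
        exact List.mem_map_of_mem h1.1
      -- m is the key of some pair of qp, hence k₀ ≤ m
      have hk₀m : k₀ ≤ m := by
        rcases keyfold_mem t a.1 with he | ⟨p, hp, he⟩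
        · have := hqpmem a (by rw [hqpe]; exact List.mem_cons_self)
          rw [hm, he]; exact hmin₀ a.1 this.2 this.1
        · have := hqpmem p (by rw [hqpe]; exact List.mem_cons_of_mem _ hp)
          rw [hm, he]; exact hmin₀ p.1 this.2 this.1
      -- pk ∈ qp has key k₀, hence m ≤ k₀
      have hmk₀ : m ≤ k₀ := by
        rw [hqpe] at hpkqp
        rcases List.mem_cons.mp hpkqp with rfl | hpkt
        · rw [hm, ← hpk1]; exact (keyfold_le t pk.1).1
        · rw [hm, ← hpk1]; exact (keyfold_le t a.1).2 pk hpkt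
      have hkm : k₀ = m := le_antisymm hk₀m hmk₀
      -- A's side: dict lookup of k₀ sees only qualifying pairs
      have hA : (some k₀).bind (pyDictGet scr)
          = (qp.find? (fun p => p.1 == k₀)).map Prod.snd := by
        simp only [Option.bind_some, pyDictGet]
        rw [find?_filter_key scr fh k₀ hq₀, hqp]
      -- B's side: the running-min fold is find? of the minimal key
      have hB : (a :: t).foldl bMin none
          = (a :: t).find? (fun p => p.1 == k₀) := by
        have h1 : (a :: t).foldl bMin none = t.foldl bMin (some a) := by
          simp [List.foldl_cons, bMin]
        rw [h1, foldl_bMin_some, hkm, hm]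
        exact (find?_min_key t a).symm
      rw [hA, hqpe, hB]
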